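-- pv_equiv track=rewrite | github.com/Arctem/grader_assigner | schedule_grading.py | split_graders_by_tslg
-- ===== SOURCE A (Python) =====
-- def split_graders_by_tslg(tslg, graders, student):
--     split_graders = {}
--     for grader in graders:
--         time = tslg[grader][student]
--         if time not in split_graders:
--             split_graders[time] = []
--         split_graders[time].append(grader)
--
--     return split_graders
-- ===== SOURCE B (Python) =====
-- def split_graders_by_tslg(tslg, graders, student):
--     times = [tslg[g][student] for g in graders]
--     return {t: [g for g, tt in zip(graders, times) if tt == t]
--             for t in dict.fromkeys(times)}
-- ===== Notes on version B (the rewrite author's own statement) =====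
-- stated objective: alternative
-- what changed: B computes all per-grader times once, dedups them in first-occurrence order via dict.fromkeys, and gathers each bucket with a zip-filter comprehension, instead of A's single online dict-bucket loop.
import Mathlib
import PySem

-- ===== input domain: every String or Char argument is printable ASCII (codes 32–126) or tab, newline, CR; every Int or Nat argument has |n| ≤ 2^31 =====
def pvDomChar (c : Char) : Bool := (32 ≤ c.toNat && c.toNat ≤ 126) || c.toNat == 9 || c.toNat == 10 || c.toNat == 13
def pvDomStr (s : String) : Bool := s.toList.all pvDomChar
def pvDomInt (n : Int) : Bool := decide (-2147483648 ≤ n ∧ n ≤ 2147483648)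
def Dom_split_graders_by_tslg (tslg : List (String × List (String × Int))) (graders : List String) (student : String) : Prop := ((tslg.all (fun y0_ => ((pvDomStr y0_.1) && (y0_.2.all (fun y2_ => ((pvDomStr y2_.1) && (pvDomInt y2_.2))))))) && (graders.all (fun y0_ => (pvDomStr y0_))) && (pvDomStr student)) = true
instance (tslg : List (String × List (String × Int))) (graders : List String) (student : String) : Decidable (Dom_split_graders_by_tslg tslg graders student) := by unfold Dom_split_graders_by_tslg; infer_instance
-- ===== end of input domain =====

-- B groups graders per distinct time by a dedup-then-gather comprehension instead of A's online
-- dict-bucket loop (objective: alternative decomposition; same results, same insertion order).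

-- tslg[grader][student] as an Option: none exactly where Python raises KeyError (excluded by Pre_)
def pvTime? (tslg : List (String × List (String × Int))) (g s : String) : Option Int :=
  ((PySem.Dict.mk tslg).get? g).bind (fun inner => (PySem.Dict.mk inner).get? s)

-- total form used by both ports; the default 0 is never reached under Pre_ (Python raises there)
def pvTime (tslg : List (String × List (String × Int))) (g s : String) : Int :=
  (pvTime? tslg g s).getD 0

-- ===== PORT A =====
def split_graders_by_tslg (tslg : List (String × List (String × Int))) (graders : List String) (student : String) : List (Int × List String) :=
  (graders.foldl (fun d grader =>
      let time := pvTime tslg grader student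
      let d := if d.contains time then d else d.insert time ([] : List String)
      d.modify time [] (fun l => l ++ [grader]))
    (PySem.Dict.empty)).items

-- ===== PORT B =====
def split_graders_by_tslg_alt (tslg : List (String × List (String × Int))) (graders : List String) (student : String) : List (Int × List String) :=
  let times := graders.map (fun g => pvTime tslg g student)
  (PySem.List.dedup times).map (fun t =>
    (t, ((graders.zip times).filter (fun p => p.2 == t)).map (fun p => p.1)))

-- ===== PRECONDITION & SPEC =====
-- Pre_ excludes exactly the inputs where Python's tslg[grader][student] raises KeyError
def Pre_split_graders_by_tslg (tslg : List (String × List (String × Int))) (graders : List String) (student : String) : Prop :=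
  graders.all (fun g => (pvTime? tslg g student).isSome) = true
instance (tslg : List (String × List (String × Int))) (graders : List String) (student : String) : Decidable (Pre_split_graders_by_tslg tslg graders student) := by unfold Pre_split_graders_by_tslg; infer_instance

def pvWitness_split_graders_by_tslg : (List (String × List (String × Int))) × List String × String :=
  ([("ann", [("stu", 3), ("bob", 1)]), ("col", [("stu", 3)])], ["ann", "col"], "stu")

def Spec_split_graders_by_tslg (tslg : List (String × List (String × Int))) (graders : List String) (student : String) (out : List (Int × List String)) : Prop := out = split_graders_by_tslg_alt tslg graders student
instance (tslg : List (String × List (String × Int))) (graders : List String) (student : String) (out : List (Int × List String)) : Decidable (Spec_split_graders_by_tslg tslg graders student out) := by unfold Spec_split_graders_by_tslg; infer_instance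

-- ===== CLAIM (what is proved, stated in full; the proofs are below) =====
def Claim_equal_split_graders_by_tslg : Prop := ∀ (tslg : List (String × List (String × Int))) (graders : List String) (student : String), Dom_split_graders_by_tslg tslg graders student → Pre_split_graders_by_tslg tslg graders student → Spec_split_graders_by_tslg tslg graders student (split_graders_by_tslg tslg graders student)

-- ===== LEMMAS AND PROOFS =====

-- A's loop body (membership test, optional empty insert, append) is the bucket-modify step
theorem pv_stepA_eq_modify (d : PySem.Dict Int (List String)) (t : Int) (g : String) :
    (let d' := if d.contains t then d else d.insert t ([] : List String)
     d'.modify t [] (fun l => l ++ [g])) = d.modify t [] (fun l => l ++ [g]) := by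
  by_cases h : d.contains t = true
  · simp [h]
  · simp only [Bool.not_eq_true] at h
    simp only [h, Bool.false_eq_true, if_false, PySem.Dict.modify]
    rw [PySem.Dict.getD_insert_self, PySem.Dict.insert_insert_self,
      PySem.Dict.getD_of_not_contains d [] h]

-- A's per-key bucket is graders filtered by their time
theorem pv_groupA (f : String → Int) (graders : List String) (k : Int) :
    ((graders.map (fun g => (f g, g))).filter (fun p => p.1 == k)).map (fun p => p.2)
      = graders.filter (fun g => f g == k) := by
  induction graders with
  | nil => rfl
  | cons a l ih => by_cases h : f a == k <;> simp [h, ih]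

theorem pv_groupB_aux (f : String → Int) (l : List String) (k : Int) :
    ((l.map (fun g => (g, f g))).filter (fun p => p.2 == k)).map (fun p => p.1)
      = l.filter (fun g => f g == k) := by
  induction l with
  | nil => rfl
  | cons a l ih => by_cases h : f a == k <;> simp [h, ih]

-- B's per-key group (zip-filter-project) is the same filter
theorem pv_groupB (f : String → Int) (graders : List String) (k : Int) :
    ((graders.zip (graders.map f)).filter (fun p => p.2 == k)).map (fun p => p.1)
      = graders.filter (fun g => f g == k) := by
  have hz : graders.zip (graders.map f) = graders.map (fun g => (g, f g)) := by
    have := @List.zip_map' _ _ _ id f graders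
    simpa using this
  rw [hz]
  exact pv_groupB_aux f graders k

-- ===== VERDICT (by name: the statement is the Claim_ definition above) =====
theorem split_graders_by_tslg_spec : Claim_equal_split_graders_by_tslg := by
  intro tslg graders student _ _
  unfold Spec_split_graders_by_tslg split_graders_by_tslg split_graders_by_tslg_alt
  set f : String → Int := fun g => pvTime tslg g student with hf
  -- A's loop is a pure modify-fold
  have hstep : (graders.foldl (fun d grader =>
      let time := f grader
      let d := if d.contains time then d else d.insert time ([] : List String)
      d.modify time [] (fun l => l ++ [grader])) PySem.Dict.empty)
      = graders.foldl (fun d g => d.modify (f g) [] (fun l => l ++ [g])) PySem.Dict.empty := by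
    apply PySem.List.foldl_congr_mem
    intro d g _
    exact pv_stepA_eq_modify d (f g) g
  rw [hstep]
  set D := graders.foldl (fun d g => d.modify (f g) [] (fun l => l ++ [g])) PySem.Dict.empty with hD
  have hnd : D.keys.Nodup := by
    rw [hD]
    exact PySem.Dict.nodup_keys_foldl_modify_key graders f [] (fun _ g l => l ++ [g])
      PySem.Dict.empty (by simp [pysem])
  have hkeys : D.keys = PySem.List.dedup (graders.map f) := by
    rw [hD, PySem.Dict.keys_foldl_modify_key graders f [] (fun _ g l => l ++ [g]),
      PySem.List.dedup_eq_ofList]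
    simp [pysem, PySem.Set.update_nil_left]
  have hget : ∀ k : Int, D.getD k [] = graders.filter (fun g => f g == k) := by
    intro k
    have hfold : graders.foldl (fun d g => d.modify (f g) [] (fun l => l ++ [g])) PySem.Dict.empty
        = (graders.map (fun g => (f g, g))).foldl
            (fun d p => d.modify p.1 [] (fun l => l ++ [p.2])) PySem.Dict.empty := by
      rw [List.foldl_map]
    rw [hD, hfold, PySem.Dict.getD_foldl_modify_append]
    simp only [PySem.Dict.getD_empty, List.nil_append]
    exact pv_groupA f graders k
  rw [PySem.Dict.items_eq_map_keys D hnd [], hkeys]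
  apply List.map_congr_left
  intro k _
  rw [hget k, pv_groupB f graders k]
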